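-- pv_equiv track=rewrite | github.com/redoy1102/codeforces-400-Problems-Target | contest/1.py | betf
-- ===== SOURCE A (Python) =====
-- import math
--
-- def good(a):
--     gcd = a[0]
--     for i in range(1, len(a)):
--         gcd = math.gcd(gcd, a[i])
--     return gcd <= len(a)
--
-- def is_beautiful(a):
--     if not good(a):
--         return False
--     for i in range(2, len(a)+1):
--         prefix = a[:i]
--         gcd = prefix[0]
--         for j in range(1, len(prefix)):
--             gcd = math.gcd(gcd, prefix[j])
--         if gcd > len(prefix):
--             return False
--     return True
--
-- def betf(a):
--     freq = {}
--     for x in a: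
--         freq[x] = freq.get(x, 0) + 1
--     for i in range(len(a)):
--         for j in range(i+1, len(a)):
--             if a[i] != a[j]:
--                 a[i], a[j] = a[j], a[i]
--                 if is_beautiful(a):
--                     return True
--                 a[i], a[j] = a[j], a[i]
--     return False
-- ===== SOURCE B (Python) =====
-- import math
--
-- def _ok(b):
--     # one-pass beauty check: every prefix of length L >= 2 has gcd <= L
--     g = b[0]
--     for k in range(1, len(b)):
--         g = math.gcd(g, b[k])
--         if g > k + 1:
--             return False
--     return True
--
-- def betf(a):
--     n = len(a)
--     for i in range(n):
--         for j in range(i + 1, n):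
--             if a[i] != a[j]:
--                 b = a[:]
--                 b[i], b[j] = b[j], b[i]
--                 if _ok(b):
--                     return True
--     return False
-- ===== Notes on version B (the rewrite author's own statement) =====
-- stated objective: faster
-- what changed: B drops the unused frequency dict, checks each candidate swap on a copy with a single incremental prefix-gcd pass with early exit (O(n) per pair) instead of A's good() pass plus re-computing every prefix gcd from scratch (O(n^2) per pair).
import Mathlib
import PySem

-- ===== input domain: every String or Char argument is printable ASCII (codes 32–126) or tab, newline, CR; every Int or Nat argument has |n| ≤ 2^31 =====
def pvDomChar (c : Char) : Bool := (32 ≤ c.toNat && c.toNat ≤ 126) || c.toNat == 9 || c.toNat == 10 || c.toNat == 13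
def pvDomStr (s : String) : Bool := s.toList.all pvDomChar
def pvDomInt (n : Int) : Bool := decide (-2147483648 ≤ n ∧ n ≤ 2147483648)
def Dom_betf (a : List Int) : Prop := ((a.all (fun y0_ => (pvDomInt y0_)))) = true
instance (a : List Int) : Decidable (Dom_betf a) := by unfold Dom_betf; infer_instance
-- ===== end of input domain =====

-- B replaces A's per-swap quadratic prefix-gcd recomputation by one incremental pass with
-- early exit (faster, O(n^3) vs O(n^4)) and drops A's unused frequency dict; equivalence is
-- about the RETURN value only (Python A mutates its argument, leaving it swapped on True).

-- ===== PORT A =====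
-- math.gcd g x : nonnegative gcd of absolute values — exact
def pygcd (g x : Int) : Int := (Int.gcd g x : Int)

def goodA (a : List Int) : Bool :=
  decide (((PySem.List.pyRange 1 (a.length : Int) 1).foldl
      (fun g i => pygcd g (PySem.List.pyGetD a i 0)) (PySem.List.pyGetD a 0 0))
    ≤ (a.length : Int))

def isBeauLoopA (a : List Int) : List Int → Bool
  | [] => true
  | i :: rest =>
      let pre := PySem.List.slice a none (some i)      -- a[:i]
      let g := (PySem.List.pyRange 1 (pre.length : Int) 1).foldl
          (fun g j => pygcd g (PySem.List.pyGetD pre j 0)) (PySem.List.pyGetD pre 0 0)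
      if g > (pre.length : Int) then false else isBeauLoopA a rest

def is_beautifulA (a : List Int) : Bool :=
  if !goodA a then false
  else isBeauLoopA a (PySem.List.pyRange 2 ((a.length : Int) + 1) 1)

-- a[i], a[j] = a[j], a[i]
def swapA (l : List Int) (i j : Int) : List Int :=
  PySem.List.pySetD (PySem.List.pySetD l i (PySem.List.pyGetD l j 0)) j (PySem.List.pyGetD l i 0)

-- inner j-loop of A, threading the mutated list through the iterations
def betfJA (i : Int) : List Int → List Int → (Bool × List Int)
  | l, [] => (false, l)
  | l, j :: rest =>
      if PySem.List.pyGetD l i 0 ≠ PySem.List.pyGetD l j 0 then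
        let l' := swapA l i j
        if is_beautifulA l' then (true, l')
        else betfJA i (swapA l' i j) rest
      else betfJA i l rest

def betfIA : List Int → List Int → (Bool × List Int)
  | l, [] => (false, l)
  | l, i :: rest =>
      match betfJA i l (PySem.List.pyRange (i + 1) (l.length : Int) 1) with
      | (true, l') => (true, l')
      | (false, l') => betfIA l' rest

def betf (a : List Int) : Bool :=
  let _freq := a.foldl (fun d x => PySem.Dict.insert d x (PySem.Dict.getD d x 0 + 1))
      (PySem.Dict.empty : PySem.Dict Int Int)   -- A builds freq and never uses it
  (betfIA a (PySem.List.pyRange 0 (a.length : Int) 1)).1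

-- ===== PORT B =====
-- one incremental pass: running gcd g, early exit as soon as g > prefix length
def okLoopB (b : List Int) : Int → List Int → Bool
  | _, [] => true
  | g, k :: rest =>
      let g' := pygcd g (PySem.List.pyGetD b k 0)
      if g' > k + 1 then false else okLoopB b g' rest

def okB (b : List Int) : Bool :=
  okLoopB b (PySem.List.pyGetD b 0 0) (PySem.List.pyRange 1 (b.length : Int) 1)

def altJ (a : List Int) (i : Int) : List Int → Bool
  | [] => false
  | j :: rest =>
      if PySem.List.pyGetD a i 0 ≠ PySem.List.pyGetD a j 0 then
        -- b = a[:]; b[i], b[j] = b[j], b[i]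
        let b := PySem.List.pySetD (PySem.List.pySetD a i (PySem.List.pyGetD a j 0)) j
            (PySem.List.pyGetD a i 0)
        if okB b then true else altJ a i rest
      else altJ a i rest

def altI (a : List Int) : List Int → Bool
  | [] => false
  | i :: rest =>
      if altJ a i (PySem.List.pyRange (i + 1) (a.length : Int) 1) then true else altI a rest

def betf_alt (a : List Int) : Bool :=
  altI a (PySem.List.pyRange 0 (a.length : Int) 1)

-- ===== PRECONDITION & SPEC =====
def Spec_betf (a : List Int) (out : Bool) : Prop := out = betf_alt a
instance (a : List Int) (out : Bool) : Decidable (Spec_betf a out) := by unfold Spec_betf; infer_instance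

-- ===== CLAIM (what is proved, stated in full; the proofs are below) =====
def Claim_equal_betf : Prop := ∀ (a : List Int), Dom_betf a → Spec_betf a (betf a)

-- ===== LEMMAS AND PROOFS =====

-- gcd of the first i elements (i ≥ 1), as both loops compute it
def pg (b : List Int) (i : Int) : Int :=
  (PySem.List.pyRange 1 i 1).foldl (fun g j => pygcd g (PySem.List.pyGetD b j 0))
    (PySem.List.pyGetD b 0 0)

theorem pg_one (b : List Int) : pg b 1 = PySem.List.pyGetD b 0 0 := by
  simp [pg, PySem.List.pyRange_one_eq_nil (by omega : (1:Int) ≤ 1)]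

theorem pg_succ (b : List Int) (i : Int) (h : 1 ≤ i) :
    pg b (i + 1) = pygcd (pg b i) (PySem.List.pyGetD b i 0) := by
  simp [pg, PySem.List.pyRange_one_succ_right (by omega : (1:Int) ≤ i), List.foldl_append]

theorem length_swapA (l : List Int) (i j : Int) : (swapA l i j).length = l.length := by
  simp [swapA, PySem.List.length_pySetD]

theorem swapA_swapA (l : List Int) (i j : Int) (h0 : 0 ≤ i) (hij : i < j)
    (hj : j < (l.length : Int)) : swapA (swapA l i j) i j = l := by
  have h0j : (0:Int) ≤ j := by omega
  have hm : i.toNat < l.length := by omega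
  have hn : j.toNat < l.length := by omega
  have hmn : i.toNat ≠ j.toNat := by omega
  have hs : ∀ (x : List Int) (hx : x.length = l.length),
      swapA x i j = (x.set i.toNat (x[j.toNat]'(by omega))).set j.toNat (x[i.toNat]'(by omega)) := by
    intro x hx
    rw [swapA, PySem.List.pyGetD_eq_getElem x 0 h0j (by omega),
        PySem.List.pyGetD_eq_getElem x 0 h0 (by omega),
        PySem.List.pySetD_of_nonneg x _ h0, PySem.List.pySetD_of_nonneg _ _ h0j]
  rw [hs l rfl, hs _ (by simp)]
  apply List.ext_getElem (by simp)
  intro k hk1 hk2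
  simp only [List.getElem_set]
  split_ifs <;> (try omega) <;> simp_all [List.getElem_set]

theorem good_eq_pg (b : List Int) :
    goodA b = decide (pg b (b.length : Int) ≤ (b.length : Int)) := rfl

theorem pre_len (b : List Int) (i : Int) (h0 : 0 ≤ i) (hn : i ≤ (b.length : Int)) :
    (PySem.List.slice b none (some i)).length = i.toNat := by
  have hc : i = ((i.toNat : Nat) : Int) := by omega
  rw [hc, PySem.List.slice_to_natCast]
  simp; omega

theorem pre_fold_eq (b : List Int) (i : Int) (h2 : 2 ≤ i) (hn : i ≤ (b.length : Int)) :
    (PySem.List.pyRange 1 i 1).foldl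
      (fun g j => pygcd g (PySem.List.pyGetD (PySem.List.slice b none (some i)) j 0))
      (PySem.List.pyGetD (PySem.List.slice b none (some i)) 0 0) = pg b i := by
  have hc : i = ((i.toNat : Nat) : Int) := by omega
  have hpre : PySem.List.slice b none (some i) = b.take i.toNat := by
    have := PySem.List.slice_to_natCast b i.toNat
    rwa [← hc] at this
  have hinit : PySem.List.pyGetD (b.take i.toNat) 0 0 = PySem.List.pyGetD b 0 0 := by
    rw [PySem.List.pyGetD_eq_getElem _ 0 (by omega) (by simp; omega),
        PySem.List.pyGetD_eq_getElem _ 0 (by omega) (by omega)]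
    simp [List.getElem_take]
  rw [pg, hpre, hinit]
  apply PySem.List.foldl_congr_mem
  intro acc x hx
  have hxb := PySem.List.mem_pyRange_one.1 hx
  congr 1
  rw [PySem.List.pyGetD_eq_getElem _ 0 (by omega) (by simp; omega),
      PySem.List.pyGetD_eq_getElem _ 0 (by omega) (by omega)]
  simp [List.getElem_take]

theorem isBeauLoopA_all (b : List Int) (is : List Int)
    (h : ∀ i ∈ is, 2 ≤ i ∧ i ≤ (b.length : Int)) :
    isBeauLoopA b is = is.all (fun i => decide (pg b i ≤ i)) := by
  induction is with
  | nil => rfl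
  | cons i rest ih =>
    obtain ⟨h2, hn⟩ := h i (by simp)
    have hrest := fun x hx => h x (List.mem_cons_of_mem _ hx)
    have hiN : (((PySem.List.slice b none (some i)).length : Nat) : Int) = i := by
      rw [pre_len b i (by omega) hn]; omega
    simp only [isBeauLoopA, List.all_cons]
    rw [hiN, pre_fold_eq b i h2 hn]
    by_cases hg : pg b i > i
    · rw [if_pos hg]
      have : decide (pg b i ≤ i) = false := by simp; omega
      rw [this, Bool.false_and]
    · rw [if_neg hg, ih hrest]
      have : decide (pg b i ≤ i) = true := by simp; omega
      rw [this, Bool.true_and]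

theorem okLoopB_all (b : List Int) (k : Int) (hk : 1 ≤ k) :
    okLoopB b (pg b k) (PySem.List.pyRange k (b.length : Int) 1)
      = (PySem.List.pyRange k (b.length : Int) 1).all
          (fun j => decide (pg b (j + 1) ≤ j + 1)) := by
  have H : ∀ (d : Nat) (k : Int), 1 ≤ k → ((b.length : Int) - k).toNat ≤ d →
      okLoopB b (pg b k) (PySem.List.pyRange k (b.length : Int) 1)
        = (PySem.List.pyRange k (b.length : Int) 1).all
            (fun j => decide (pg b (j + 1) ≤ j + 1)) := by
    intro d
    induction d with
    | zero =>
      intro k hk hd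
      rw [PySem.List.pyRange_one_eq_nil (by omega)]; rfl
    | succ d ih =>
      intro k hk hd
      by_cases hkn : k < (b.length : Int)
      · rw [PySem.List.pyRange_one_cons hkn]
        simp only [okLoopB, List.all_cons]
        rw [← pg_succ b k hk]
        by_cases hg : pg b (k + 1) > k + 1
        · rw [if_pos hg]
          have : decide (pg b (k + 1) ≤ k + 1) = false := by simp; omega
          rw [this, Bool.false_and]
        · rw [if_neg hg, ih (k + 1) (by omega) (by omega)]
          have : decide (pg b (k + 1) ≤ k + 1) = true := by simp; omega
          rw [this, Bool.true_and]
      · rw [PySem.List.pyRange_one_eq_nil (by omega)]; rfl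
  exact H ((b.length : Int) - k).toNat k hk le_rfl

theorem beau_eq_ok (b : List Int) (h : 2 ≤ (b.length : Int)) :
    is_beautifulA b = okB b := by
  have hall : ∀ i ∈ PySem.List.pyRange 2 ((b.length : Int) + 1) 1,
      2 ≤ i ∧ i ≤ (b.length : Int) := by
    intro i hi; have := PySem.List.mem_pyRange_one.1 hi; omega
  rw [is_beautifulA, good_eq_pg, isBeauLoopA_all b _ hall, okB, ← pg_one b,
      okLoopB_all b 1 le_rfl]
  by_cases hg : pg b (b.length : Int) ≤ (b.length : Int)
  · rw [decide_eq_true hg]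
    simp only [Bool.not_true, Bool.false_eq_true, if_false]
    rw [Bool.eq_iff_iff]
    simp only [List.all_eq_true, PySem.List.mem_pyRange_one, decide_eq_true_eq]
    constructor
    · intro H j hj
      exact H (j + 1) (by omega)
    · intro H i hi
      have := H (i - 1) (by omega)
      have e : i - 1 + 1 = i := by omega
      rwa [e] at this
  · rw [decide_eq_false hg]
    simp only [Bool.not_false, if_true]
    symm
    rw [List.all_eq_false]
    refine ⟨(b.length : Int) - 1, PySem.List.mem_pyRange_one.2 (by omega), ?_⟩
    have e : (b.length : Int) - 1 + 1 = (b.length : Int) := by omega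
    rw [e]; simp; omega

theorem betfJA_eq (a : List Int) (i : Int) (h0 : 0 ≤ i) (js : List Int)
    (h : ∀ j ∈ js, i < j ∧ j < (a.length : Int)) :
    (betfJA i a js).1 = altJ a i js ∧
      ((betfJA i a js).1 = false → (betfJA i a js).2 = a) := by
  induction js with
  | nil => exact ⟨rfl, fun _ => rfl⟩
  | cons j rest ih =>
    obtain ⟨hij, hjl⟩ := h j (by simp)
    have hrest := ih (fun x hx => h x (List.mem_cons_of_mem _ hx))
    simp only [betfJA, altJ]
    rw [show PySem.List.pySetD (PySem.List.pySetD a i (PySem.List.pyGetD a j 0)) j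
        (PySem.List.pyGetD a i 0) = swapA a i j from rfl]
    by_cases hne : PySem.List.pyGetD a i 0 ≠ PySem.List.pyGetD a j 0
    · rw [if_pos hne, if_pos hne]
      have hb : is_beautifulA (swapA a i j) = okB (swapA a i j) := by
        apply beau_eq_ok
        rw [length_swapA]; omega
      by_cases hok : okB (swapA a i j) = true
      · rw [hb, hok, if_pos rfl, if_pos rfl]
        exact ⟨rfl, fun hc => absurd hc (by simp)⟩
      · have hokf : okB (swapA a i j) = false := by
          revert hok; cases okB (swapA a i j) <;> simp
        rw [hb, hokf]
        simp only [Bool.false_eq_true, if_false]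
        rw [swapA_swapA a i j h0 hij hjl]
        exact hrest
    · rw [if_neg hne, if_neg hne]
      exact hrest

theorem betfIA_eq (a : List Int) (is : List Int)
    (h : ∀ i ∈ is, 0 ≤ i ∧ i < (a.length : Int)) :
    (betfIA a is).1 = altI a is := by
  induction is with
  | nil => rfl
  | cons i rest ih =>
    obtain ⟨h0, hil⟩ := h i (by simp)
    have hrest := ih (fun x hx => h x (List.mem_cons_of_mem _ hx))
    have hcond : ∀ j ∈ PySem.List.pyRange (i + 1) ((a.length : Int)) 1,
        i < j ∧ j < (a.length : Int) := by
      intro j hj; have := PySem.List.mem_pyRange_one.1 hj; omega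
    obtain ⟨e1, e2⟩ := betfJA_eq a i h0 _ hcond
    have hun : betfIA a (i :: rest)
        = match betfJA i a (PySem.List.pyRange (i + 1) ((a.length : Int)) 1) with
          | (true, l') => (true, l')
          | (false, l') => betfIA l' rest := rfl
    rcases hR : betfJA i a (PySem.List.pyRange (i + 1) ((a.length : Int)) 1) with ⟨bb, l'⟩
    rw [hR] at e1 e2
    cases bb with
    | true =>
      rw [hun, hR]
      simp [altI, ← e1]
    | false =>
      rw [hun, hR]
      have hl' : l' = a := e2 rfl
      simp only [altI, ← e1, Bool.false_eq_true, if_false, hl']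
      simpa [hl'] using hrest

-- ===== VERDICT (by name: the statement is the Claim_ definition above) =====
theorem betf_spec : Claim_equal_betf := by
  intro a _
  unfold Spec_betf betf betf_alt
  exact betfIA_eq a _ (fun i hi => by
    have := (PySem.List.mem_pyRange_one).1 hi; omega)
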